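-- pv_equiv track=rewrite | github.com/world137/study2 | lab10-1.py | vertexCover3
-- ===== SOURCE A (Python) =====
-- def vertexCover3(clause,nv):
--     vertices=(len(nv)*2)+(len(clause)*3)        # จำนวนจุดของการฟ ==> nv = list
--     cover=(len(nv))+(len(clause)*2)             # k
--     graph = [[0]*vertices for i in range(vertices)]
--     p=(len(nv)*2)                               #จุดเริ่มต้นของสามเหลี่ยมได้ล่าง
--     for n in range(0,len(nv)):
--         graph[n*2][n*2+1]=graph[n*2+1][n*2]=1   # กำหนดเส้นเชื่อมระหว่างจุด (ตัวแปร) ในเมทริกซ์ (จุดด้านบนสามเหลี่ยม) n = 0 ==> 0,1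
--
--     for i in range(len(clause)):
--         graph[p][p+1]=graph[p+1][p]=1           # กำหนดเส้นเชื่อมระหว่างจุดในแต่ละสามเหลี่ยม ในเมทริกซ์
--         graph[p][p+2]=graph[p+2][p]=1
--         graph[p+1][p+2]=graph[p+2][p+1]=1
--
--         for j in range(3):                      # 3-SAT
--             v=(abs(clause[i][j])-1)*2           # หาตำแหน่งของค่าด้านบนที่ตรงกับค่าด้านล่างทีละจุด *2 คือ 1 ค่ามีทั้งบวกและลบ
--             if clause[i][j]>0 :                 # กำหนดเส้นชื่อมระหว่างจุดตั้งต้นและสามเหลี่ยม ในเมทริกซ์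
--                 graph[p+j][v]=graph[v][p+j]=1
--             else:
--                 graph[p+j][v+1]=graph[v+1][p+j]=1  # ค่าที่เช็คถ้าเป็นลบให้ +1 เป็นตำแหน่งถัดไป(ด้านบน)
--         p+=3                                       # clause ถัดไป
--
--     return (vertices,cover,graph)
-- ===== SOURCE B (Python) =====
-- def vertexCover3(clause, nv):
--     base = len(nv) * 2
--     vertices = base + len(clause) * 3
--     cover = len(nv) + len(clause) * 2
--     # each vertex records only its own forward edges, derived from its index
--     half = [[0] * vertices for _ in range(vertices)]
--     for a in range(vertices):
--         row = half[a]
--         if a < base: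
--             if a % 2 == 0:
--                 row[a + 1] = 1                  # variable edge, written once
--         else:
--             i, j = divmod(a - base, 3)
--             for k in range(j + 1, 3):
--                 row[base + 3 * i + k] = 1       # triangle edges, written once
--             x = clause[i][j]
--             v = (abs(x) - 1) * 2
--             row[v if x > 0 else v + 1] = 1      # the literal's connecting edge
--     # symmetrization pass produces the undirected adjacency matrix
--     graph = [[max(half[a][b], half[b][a]) for b in range(vertices)] for a in range(vertices)]
--     return (vertices, cover, graph)
-- ===== Notes on version B (the rewrite author's own statement) =====
-- stated objective: alternative
-- what changed: B replaces A's in-place symmetric writes from interleaved per-variable/per-clause loops (with a running triangle-base counter p) by a per-vertex decomposition: each vertex derives its own forward edges from its index via divmod into a directed half-matrix, and a final symmetrization pass graph[a][b]=max(half[a][b],half[b][a]) produces the undirected adjacency matrix.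
import Mathlib
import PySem

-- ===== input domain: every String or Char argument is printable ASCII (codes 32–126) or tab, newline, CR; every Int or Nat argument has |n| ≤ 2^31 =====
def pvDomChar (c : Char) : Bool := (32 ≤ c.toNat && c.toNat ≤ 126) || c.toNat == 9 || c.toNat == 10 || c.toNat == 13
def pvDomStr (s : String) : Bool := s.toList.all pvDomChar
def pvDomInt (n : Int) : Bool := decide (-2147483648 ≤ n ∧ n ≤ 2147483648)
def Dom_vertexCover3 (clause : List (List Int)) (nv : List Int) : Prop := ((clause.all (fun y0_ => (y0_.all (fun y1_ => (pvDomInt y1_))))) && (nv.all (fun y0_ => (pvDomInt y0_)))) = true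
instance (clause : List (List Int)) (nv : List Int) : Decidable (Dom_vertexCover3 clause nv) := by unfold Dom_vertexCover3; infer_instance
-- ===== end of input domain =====

-- B lets every vertex write only its own forward edges (derived from its index by divmod) into a
-- directed half-matrix and then symmetrizes it with max, instead of A's interleaved per-variable and
-- per-clause loops writing both symmetric cells in place with a running base counter (alternative
-- decomposition, same O(V^2) cost). Neither program mutates its arguments.


-- ===== PORT A =====
-- graph[a][b] = 1  (Python list assignment; pyGetD/pySetD are exact, including negative-index wraparound)
def pyAssign (g : List (List Int)) (a b : Int) : List (List Int) :=
  PySem.List.pySetD g a (PySem.List.pySetD (PySem.List.pyGetD g a []) b 1)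

-- body of A's clause loop (c is the row clause[i]; state = (graph, p))
def stepA (st : List (List Int) × Int) (c : List Int) : List (List Int) × Int :=
  let g := st.1
  let p := st.2
  let g := pyAssign (pyAssign g p (p+1)) (p+1) p
  let g := pyAssign (pyAssign g p (p+2)) (p+2) p
  let g := pyAssign (pyAssign g (p+1) (p+2)) (p+2) (p+1)
  let g := (PySem.List.pyRange 0 3 1).foldl
    (fun g j =>
      let x := PySem.List.pyGetD c j 0
      let v := (|x| - 1) * 2
      if x > 0 then pyAssign (pyAssign g (p+j) v) v (p+j)
      else pyAssign (pyAssign g (p+j) (v+1)) (v+1) (p+j)) g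
  (g, p + 3)

def vertexCover3 (clause : List (List Int)) (nv : List Int) : Int × Int × List (List Int) :=
  let vertices : Int := (nv.length : Int) * 2 + (clause.length : Int) * 3
  let cover : Int := (nv.length : Int) + (clause.length : Int) * 2
  let graph : List (List Int) :=
    (PySem.List.pyRange 0 vertices 1).map (fun _ => List.replicate vertices.toNat 0)
  let p : Int := (nv.length : Int) * 2
  let graph :=
    (PySem.List.pyRange 0 (nv.length : Int) 1).foldl
      (fun g n => pyAssign (pyAssign g (n*2) (n*2+1)) (n*2+1) (n*2)) graph
  let st :=
    (PySem.List.pyRange 0 (clause.length : Int) 1).foldl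
      (fun st i => stepA st (PySem.List.pyGetD clause i [])) (graph, p)
  (vertices, cover, st.1)

-- ===== PORT B =====
-- row of vertex a in B's directed half-matrix: only a's own forward edges are written
-- (Python's in-place 'row[...] = 1' on row = half[a] is modelled by rebuilding the row and storing it back)
def rowUpdate (clause : List (List Int)) (base : Int) (a : Int) (row : List Int) : List Int :=
  if a < base then
    (if PySem.Int.mod a 2 = 0 then PySem.List.pySetD row (a + 1) 1 else row)
  else
    let i := PySem.Int.floordiv (a - base) 3
    let j := PySem.Int.mod (a - base) 3
    let row := (PySem.List.pyRange (j + 1) 3 1).foldl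
      (fun r k => PySem.List.pySetD r (base + 3 * i + k) 1) row
    let x := PySem.List.pyGetD (PySem.List.pyGetD clause i []) j 0
    let v := (|x| - 1) * 2
    PySem.List.pySetD row (if x > 0 then v else v + 1) 1

def vertexCover3_alt (clause : List (List Int)) (nv : List Int) : Int × Int × List (List Int) :=
  let base : Int := (nv.length : Int) * 2
  let vertices : Int := base + (clause.length : Int) * 3
  let cover : Int := (nv.length : Int) + (clause.length : Int) * 2
  let half : List (List Int) :=
    (PySem.List.pyRange 0 vertices 1).map (fun _ => List.replicate vertices.toNat 0)
  let half :=
    (PySem.List.pyRange 0 vertices 1).foldl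
      (fun h a => PySem.List.pySetD h a (rowUpdate clause base a (PySem.List.pyGetD h a []))) half
  let graph :=
    (PySem.List.pyRange 0 vertices 1).map (fun a =>
      (PySem.List.pyRange 0 vertices 1).map (fun b =>
        max (PySem.List.pyGetD (PySem.List.pyGetD half a []) b 0)
            (PySem.List.pyGetD (PySem.List.pyGetD half b []) a 0)))
  (vertices, cover, graph)

-- ===== PRECONDITION & SPEC =====
-- Pre_ holds exactly where the Python A returns: every clause row has at least 3 literals
-- and every used literal's target index stays inside Python's (wraparound-inclusive) range.
def Pre_vertexCover3 (clause : List (List Int)) (nv : List Int) : Prop :=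
  ∀ c ∈ clause, 3 ≤ c.length ∧ ∀ x ∈ c.take 3,
    (0 < x → 2*(x-1) < 2*(nv.length : Int) + 3*(clause.length : Int)) ∧
    (x < 0 → 2*(-x)-1 < 2*(nv.length : Int) + 3*(clause.length : Int))

instance (clause : List (List Int)) (nv : List Int) : Decidable (Pre_vertexCover3 clause nv) := by
  unfold Pre_vertexCover3; infer_instance

def pvWitness_vertexCover3 : List (List Int) × List Int := ([[1, -2, 3], [-1, 2, -3]], [0, 0, 0])

def Spec_vertexCover3 (clause : List (List Int)) (nv : List Int) (out : Int × Int × List (List Int)) : Prop := out = vertexCover3_alt clause nv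
instance (clause : List (List Int)) (nv : List Int) (out : Int × Int × List (List Int)) : Decidable (Spec_vertexCover3 clause nv out) := by unfold Spec_vertexCover3; infer_instance

-- ===== CLAIM (what is proved, stated in full; the proofs are below) =====
def Claim_equal_vertexCover3 : Prop := ∀ (clause : List (List Int)) (nv : List Int), Dom_vertexCover3 clause nv → Pre_vertexCover3 clause nv → Spec_vertexCover3 clause nv (vertexCover3 clause nv)

-- ===== LEMMAS AND PROOFS =====

-- Python's wraparound normalisation of an in-range index (−V ≤ t < V)
def normI (V t : Int) : Int := if t < 0 then t + V else t

lemma pyGetD_pySetD_norm {α : Type} (xs : List α) {V i b : Int} (v d : α)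
    (hlen : (xs.length : Int) = V) (hi1 : -V ≤ i) (hi2 : i < V)
    (hb1 : 0 ≤ b) (hb2 : b < V) :
    PySem.List.pyGetD (PySem.List.pySetD xs i v) b d
      = if b = normI V i then v else PySem.List.pyGetD xs b d := by
  have hnorm1 : 0 ≤ normI V i := by unfold normI; split <;> omega
  have hnorm2 : normI V i < V := by unfold normI; split <;> omega
  have hset : PySem.List.pySetD xs i v = xs.set (normI V i).toNat v := by
    unfold PySem.List.pySetD PySem.List.pySet? PySem.List.pyIdx?
    by_cases h0 : 0 ≤ i
    · simp only [if_pos h0, if_pos (by omega : i < (xs.length : Int))]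
      simp [normI, if_neg (by omega : ¬ i < 0)]
    · simp only [if_neg h0, if_pos (by omega : -(xs.length : Int) ≤ i)]
      simp only [Option.map_some, Option.getD_some]
      congr 1
      simp only [normI, if_pos (by omega : i < 0)]
      omega
  rw [hset]
  rw [PySem.List.pyGetD_eq_getElem _ d hb1 (by simp only [List.length_set]; omega)]
  rw [PySem.List.pyGetD_eq_getElem _ d hb1 (by omega)]
  rw [List.getElem_set]
  by_cases he : b = normI V i
  · rw [if_pos he, if_pos (by omega)]
  · rw [if_neg he, if_neg (by omega)]


lemma pyGetD_norm {α : Type} (xs : List α) {V i : Int} (d : α)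
    (hlen : (xs.length : Int) = V) (hi1 : -V ≤ i) (hi2 : i < V) :
    PySem.List.pyGetD xs i d = xs[(normI V i).toNat]'(by unfold normI; split <;> omega) := by
  unfold PySem.List.pyGetD PySem.List.pyGet? PySem.List.pyIdx?
  by_cases h0 : 0 ≤ i
  · rw [if_pos h0, if_pos (by omega : i < (xs.length : Int))]
    simp only [Option.bind_some]
    rw [List.getElem?_eq_getElem (by omega), Option.getD_some]
    congr 1
    unfold normI; rw [if_neg (by omega)]
  · rw [if_neg h0, if_pos (by omega : -(xs.length : Int) ≤ i)]
    simp only [Option.bind_some]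
    rw [List.getElem?_eq_getElem (by omega), Option.getD_some]
    congr 1
    unfold normI; rw [if_pos (by omega)]; omega

def Shp (V : Int) (g : List (List Int)) : Prop :=
  (g.length : Int) = V ∧ ∀ r ∈ g, (r.length : Int) = V

def cellM (g : List (List Int)) (a b : Int) : Int :=
  PySem.List.pyGetD (PySem.List.pyGetD g a []) b 0

lemma normI_idem (V i : Int) (h : -V ≤ i) : normI V (normI V i) = normI V i := by
  unfold normI
  by_cases h1 : i < 0
  · rw [if_pos h1, if_neg (by omega)]
  · rw [if_neg h1, if_neg h1]

lemma shp_pySetD_row {V : Int} {g : List (List Int)} (hg : Shp V g) (i : Int)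
    {row : List Int} (hrow : (row.length : Int) = V) :
    Shp V (PySem.List.pySetD g i row) := by
  obtain ⟨h1, h2⟩ := hg
  refine ⟨by rw [PySem.List.length_pySetD]; exact h1, ?_⟩
  intro r hr
  unfold PySem.List.pySetD PySem.List.pySet? at hr
  rcases ho : PySem.List.pyIdx? g.length i with _ | k <;> rw [ho] at hr
  · simp only [Option.map_none, Option.getD_none] at hr; exact h2 r hr
  · simp only [Option.map_some, Option.getD_some] at hr
    rcases List.mem_or_eq_of_mem_set hr with h | h
    · exact h2 r h
    · subst h; exact hrow

lemma row_pyGetD_norm {V : Int} {g : List (List Int)} (hg : Shp V g) {i : Int}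
    (hi1 : -V ≤ i) (hi2 : i < V) :
    ((PySem.List.pyGetD g i []).length : Int) = V := by
  rw [pyGetD_norm g [] hg.1 hi1 hi2]
  exact hg.2 _ (List.getElem_mem _)

lemma shp_pyAssign {V : Int} {g : List (List Int)} (hg : Shp V g) {i : Int} (j : Int)
    (hi1 : -V ≤ i) (hi2 : i < V) :
    Shp V (pyAssign g i j) := by
  apply shp_pySetD_row hg
  rw [PySem.List.length_pySetD]
  exact row_pyGetD_norm hg hi1 hi2

lemma cell_pyAssign {V : Int} {g : List (List Int)} (hg : Shp V g) {i j a b : Int}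
    (hi : -V ≤ i ∧ i < V) (hj : -V ≤ j ∧ j < V) (ha : 0 ≤ a ∧ a < V) (hb : 0 ≤ b ∧ b < V) :
    cellM (pyAssign g i j) a b
      = if a = normI V i ∧ b = normI V j then 1 else cellM g a b := by
  obtain ⟨h1, h2⟩ := hg
  have hrlen : ((PySem.List.pySetD (PySem.List.pyGetD g i []) j 1).length : Int) = V := by
    rw [PySem.List.length_pySetD]; exact row_pyGetD_norm ⟨h1, h2⟩ hi.1 hi.2
  have hsame : PySem.List.pyGetD g (normI V i) [] = PySem.List.pyGetD g i [] := by
    rw [pyGetD_norm g [] h1 hi.1 hi.2,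
        pyGetD_norm g [] h1 (by have := normI_idem V i hi.1; unfold normI at *; split at * <;> omega)
          (by unfold normI; split <;> omega)]
    simp only [normI_idem V i hi.1]
  unfold cellM pyAssign
  rw [pyGetD_pySetD_norm g _ [] h1 hi.1 hi.2 ha.1 ha.2]
  by_cases hai : a = normI V i
  · rw [if_pos hai]
    rw [pyGetD_pySetD_norm _ _ 0 (row_pyGetD_norm ⟨h1, h2⟩ hi.1 hi.2) hj.1 hj.2 hb.1 hb.2]
    by_cases hbj : b = normI V j
    · rw [if_pos hbj, if_pos ⟨hai, hbj⟩]
    · rw [if_neg hbj, if_neg (by tauto)]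
      subst hai; rw [hsame]
  · rw [if_neg hai, if_neg (by tauto)]

def fillEdge (g : List (List Int)) (e : Int × Int) : List (List Int) :=
  pyAssign (pyAssign g e.1 e.2) e.2 e.1

def eMatch (V a b : Int) (e : Int × Int) : Bool :=
  (a = normI V e.1 ∧ b = normI V e.2) ∨ (a = normI V e.2 ∧ b = normI V e.1)

lemma shp_fillEdge {V : Int} {g : List (List Int)} (hg : Shp V g) {e : Int × Int}
    (he : -V ≤ e.1 ∧ e.1 < V ∧ -V ≤ e.2 ∧ e.2 < V) : Shp V (fillEdge g e) :=
  shp_pyAssign (shp_pyAssign hg e.2 he.1 he.2.1) e.1 he.2.2.1 he.2.2.2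

lemma cell_fillEdge {V : Int} {g : List (List Int)} (hg : Shp V g) {e : Int × Int} {a b : Int}
    (he : -V ≤ e.1 ∧ e.1 < V ∧ -V ≤ e.2 ∧ e.2 < V)
    (ha : 0 ≤ a ∧ a < V) (hb : 0 ≤ b ∧ b < V) :
    cellM (fillEdge g e) a b = if eMatch V a b e then 1 else cellM g a b := by
  unfold fillEdge
  rw [cell_pyAssign (shp_pyAssign hg e.2 he.1 he.2.1) ⟨he.2.2.1, he.2.2.2⟩ ⟨he.1, he.2.1⟩ ha hb]
  rw [cell_pyAssign hg ⟨he.1, he.2.1⟩ ⟨he.2.2.1, he.2.2.2⟩ ha hb]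
  simp only [eMatch]
  split_ifs <;> simp_all <;> tauto

lemma cell_foldFill {V : Int} :
    ∀ (es : List (Int × Int)) (g : List (List Int)), Shp V g →
      (∀ e ∈ es, -V ≤ e.1 ∧ e.1 < V ∧ -V ≤ e.2 ∧ e.2 < V) →
      Shp V (es.foldl fillEdge g) ∧
      ∀ a b : Int, 0 ≤ a ∧ a < V → 0 ≤ b ∧ b < V →
        cellM (es.foldl fillEdge g) a b
          = if es.any (eMatch V a b) then 1 else cellM g a b := by
  intro es
  induction es with
  | nil =>
    intro g hg _
    exact ⟨hg, fun a b _ _ => by simp⟩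
  | cons e es ih =>
    intro g hg hb
    have he := hb e (List.mem_cons_self)
    have hrest : ∀ e' ∈ es, -V ≤ e'.1 ∧ e'.1 < V ∧ -V ≤ e'.2 ∧ e'.2 < V :=
      fun e' h => hb e' (List.mem_cons_of_mem _ h)
    obtain ⟨hshp, hcell⟩ := ih (fillEdge g e) (shp_fillEdge hg he) hrest
    refine ⟨by simpa using hshp, ?_⟩
    intro a b ha hbb
    rw [List.foldl_cons, hcell a b ha hbb, cell_fillEdge hg he ha hbb, List.any_cons]
    cases h1 : es.any (eMatch V a b) <;> cases h2 : eMatch V a b e <;> simp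

def litEdge (p : Int) (c : List Int) (j : Int) : Int × Int :=
  let x := PySem.List.pyGetD c j 0
  let v := (|x| - 1) * 2
  (p + j, if x > 0 then v else v + 1)

def clauseEdges (p : Int) (c : List Int) : List (Int × Int) :=
  [(p, p+1), (p, p+2), (p+1, p+2)] ++ (PySem.List.pyRange 0 3 1).map (litEdge p c)

def allEdges (clause : List (List Int)) (nv : List Int) : List (Int × Int) :=
  (PySem.List.pyRange 0 (nv.length : Int) 1).map (fun n => (2*n, 2*n+1)) ++
    (PySem.List.enumerate clause).flatMap
      (fun ic => clauseEdges ((nv.length : Int) * 2 + 3 * ic.1) ic.2)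

def zeroM (V : Int) : List (List Int) :=
  (PySem.List.pyRange 0 V 1).map (fun _ => List.replicate V.toNat 0)

lemma stepA_eq (g : List (List Int)) (p : Int) (c : List Int) :
    stepA (g, p) c = ((clauseEdges p c).foldl fillEdge g, p + 3) := by
  simp only [stepA, clauseEdges, List.foldl_append, List.foldl_map, List.foldl_cons, List.foldl_nil]
  congr 2
  funext g j
  simp only [fillEdge, litEdge]
  split <;> rfl

lemma loopA_eq (base : Int) :
    ∀ (cs : List (List Int)) (g : List (List Int)) (s : Int),
      cs.foldl stepA (g, base + 3*s)
        = (((PySem.List.enumerate cs s).flatMap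
              (fun ic => clauseEdges (base + 3*ic.1) ic.2)).foldl fillEdge g,
           base + 3*(s + cs.length)) := by
  intro cs
  induction cs with
  | nil => intro g s; simp [PySem.List.enumerate_nil]
  | cons c cs ih =>
    intro g s
    rw [List.foldl_cons, stepA_eq]
    have h3 : base + 3*s + 3 = base + 3*(s+1) := by ring
    rw [h3, ih _ (s+1)]
    rw [PySem.List.enumerate_cons]
    simp only [List.flatMap_cons, List.foldl_append, List.length_cons, Prod.mk.injEq]
    exact ⟨trivial, by push_cast; ring⟩

lemma varLoop_eq (n : Int) (g0 : List (List Int)) :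
    (PySem.List.pyRange 0 n 1).foldl
      (fun g k => pyAssign (pyAssign g (k*2) (k*2+1)) (k*2+1) (k*2)) g0
    = ((PySem.List.pyRange 0 n 1).map (fun k => (2*k, 2*k+1))).foldl fillEdge g0 := by
  rw [List.foldl_map]
  congr 1
  funext g k
  simp [fillEdge, Int.mul_comm]

lemma loopA_zero (base : Int) (cs : List (List Int)) (g : List (List Int)) :
    cs.foldl stepA (g, base)
      = (((PySem.List.enumerate cs 0).flatMap
            (fun ic => clauseEdges (base + 3*ic.1) ic.2)).foldl fillEdge g,
         base + 3*cs.length) := by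
  have h := loopA_eq base cs g 0
  simpa using h

lemma A_eq (clause : List (List Int)) (nv : List Int) :
    vertexCover3 clause nv
      = ((nv.length : Int) * 2 + (clause.length : Int) * 3,
         (nv.length : Int) + (clause.length : Int) * 2,
         (allEdges clause nv).foldl fillEdge
           (zeroM ((nv.length : Int) * 2 + (clause.length : Int) * 3))) := by
  unfold vertexCover3 allEdges zeroM
  simp only [varLoop_eq, PySem.List.foldl_pyRange_zero_pyGetD', loopA_zero, List.foldl_append]

def tgtOf (clause : List (List Int)) (base a : Int) : Int :=
  let x := PySem.List.pyGetD
    (PySem.List.pyGetD clause (PySem.Int.floordiv (a - base) 3) [])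
    (PySem.Int.mod (a - base) 3) 0
  (|x| - 1) * 2 + (if x > 0 then 0 else 1)

def fwdB (clause : List (List Int)) (base V a b : Int) : Bool :=
  if a < base then decide (PySem.Int.mod a 2 = 0 ∧ b = a + 1)
  else decide ((a < b ∧ b < base + 3 * (PySem.Int.floordiv (a - base) 3) + 3) ∨
               b = normI V (tgtOf clause base a))

-- the half-matrix fold writes each row exactly once, from its zero initial value
lemma fold_rows (F : Int → List Int → List Int) (z : List Int) (V : Int) :
    ∀ (n : Nat) (pre : List (List Int)), ((pre.length : Int) + n = V) →
      (PySem.List.pyRange (pre.length : Int) V 1).foldl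
        (fun h a => PySem.List.pySetD h a (F a (PySem.List.pyGetD h a [])))
        (pre ++ List.replicate n z)
      = pre ++ (PySem.List.pyRange (pre.length : Int) V 1).map (fun a => F a z) := by
  intro n
  induction n with
  | zero =>
    intro pre h
    rw [PySem.List.pyRange_one_eq_nil (by omega)]
    simp
  | succ m ih =>
    intro pre h
    have hk : (pre.length : Int) < V := by omega
    rw [PySem.List.pyRange_one_cons hk]
    rw [List.foldl_cons, List.map_cons]
    have hget : PySem.List.pyGetD (pre ++ List.replicate (m+1) z) (pre.length : Int) [] = z := by
      rw [PySem.List.pyGetD_eq_getElem _ [] (by omega)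
        (by simp only [List.length_append, List.length_replicate]; push_cast; omega)]
      rw [List.getElem_append_right (by simp)]
      simp
    rw [hget]
    have hset : PySem.List.pySetD (pre ++ List.replicate (m+1) z) (pre.length : Int)
        (F (pre.length : Int) z) = (pre ++ [F (pre.length : Int) z]) ++ List.replicate m z := by
      rw [PySem.List.pySetD_of_nonneg _ _ (by omega)]
      rw [Int.toNat_natCast]
      rw [List.replicate_succ, List.set_append_right _ _ (by omega)]
      simp
    rw [hset]
    have h' := ih (pre ++ [F (pre.length : Int) z]) (by simp; omega)
    simp only [List.length_append, List.length_cons, List.length_nil, Nat.cast_add,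
      Nat.cast_one] at h'
    norm_num at h'
    simpa using h'

lemma zcell {V b : Int} (hb1 : 0 ≤ b) (hb2 : b < V) :
    PySem.List.pyGetD (List.replicate V.toNat (0:Int)) b 0 = 0 := by
  rw [PySem.List.pyGetD_eq_getElem _ 0 hb1 (by simp; omega)]
  simp

lemma rowCell (clause : List (List Int)) (nv : List Int) (hpre : Pre_vertexCover3 clause nv)
    {a b : Int}
    (ha : 0 ≤ a ∧ a < (nv.length : Int) * 2 + (clause.length : Int) * 3)
    (hb : 0 ≤ b ∧ b < (nv.length : Int) * 2 + (clause.length : Int) * 3) :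
    PySem.List.pyGetD
      (rowUpdate clause ((nv.length : Int) * 2) a
        (List.replicate ((nv.length : Int) * 2 + (clause.length : Int) * 3).toNat 0)) b 0
      = if fwdB clause ((nv.length : Int) * 2) ((nv.length : Int) * 2 + (clause.length : Int) * 3) a b
        then 1 else 0 := by
  set base : Int := (nv.length : Int) * 2 with hbase
  set V : Int := base + (clause.length : Int) * 3 with hV
  have hV0 : 0 ≤ V := by omega
  have hzlen : ((List.replicate V.toNat (0:Int)).length : Int) = V := by simp; omega
  unfold rowUpdate fwdB
  by_cases hav : a < base
  · rw [if_pos hav, if_pos hav]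
    by_cases hm : PySem.Int.mod a 2 = 0
    · have hdvd : (2:Int) ∣ a := (PySem.Int.mod_eq_zero_iff_dvd a 2).mp hm
      have ha1 : a + 1 < V := by omega
      rw [if_pos hm]
      rw [pyGetD_pySetD_norm _ _ _ hzlen (by omega) ha1 hb.1 hb.2]
      rw [show normI V (a+1) = a + 1 from by unfold normI; rw [if_neg (by omega)]]
      by_cases hba : b = a + 1
      · rw [if_pos hba, if_pos (by simp only [decide_eq_true_eq]; exact ⟨hm, hba⟩)]
      · rw [if_neg hba, zcell hb.1 hb.2,
          if_neg (by simp only [decide_eq_true_eq]; exact fun h => hba h.2)]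
    · rw [if_neg hm, zcell hb.1 hb.2,
        if_neg (by simp only [decide_eq_true_eq]; exact fun h => hm h.1)]
  · rw [if_neg hav, if_neg hav]
    simp only []
    set i : Int := PySem.Int.floordiv (a - base) 3 with hi
    set j : Int := PySem.Int.mod (a - base) 3 with hj
    have hj1 : 0 ≤ j := PySem.Int.mod_nonneg _ (by norm_num)
    have hj2 : j < 3 := PySem.Int.mod_lt _ (by norm_num)
    have hij : i * 3 + j = a - base := PySem.Int.floordiv_mul_add_mod _ _
    have hi1 : 0 ≤ i := by omega
    have hi2 : i < (clause.length : Int) := by omega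
    have hilt : i.toNat < clause.length := by omega
    have hcl : PySem.List.pyGetD clause i [] = clause[i.toNat]'hilt :=
      PySem.List.pyGetD_eq_getElem clause [] hi1 (by omega)
    obtain ⟨hclen, hxcond⟩ := hpre _ (List.getElem_mem hilt)
    have hjlt : j.toNat < (clause[i.toNat]'hilt).length := by omega
    have hx : PySem.List.pyGetD (clause[i.toNat]'hilt) j 0 = (clause[i.toNat]'hilt)[j.toNat]'hjlt :=
      PySem.List.pyGetD_eq_getElem _ 0 hj1 (by push_cast; omega)
    have hxmem : (clause[i.toNat]'hilt)[j.toNat]'hjlt ∈ (clause[i.toNat]'hilt).take 3 := by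
      rw [List.mem_take_iff_getElem]
      exact ⟨j.toNat, by omega, rfl⟩
    set x : Int := (clause[i.toNat]'hilt)[j.toNat]'hjlt with hxv
    obtain ⟨hxp, hxn⟩ := hxcond x hxmem
    set t : Int := if x > 0 then (|x| - 1) * 2 else (|x| - 1) * 2 + 1 with ht
    have htgt : tgtOf clause base a = t := by
      unfold tgtOf
      rw [← hi, ← hj, hcl, hx, ht]
      show (|x| - 1) * 2 + (if x > 0 then 0 else 1) = _
      by_cases h0 : x > 0
      · rw [if_pos h0, if_pos h0]; try ring
      · rw [if_neg h0, if_neg h0]; try ring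
    have habs : (0 < x ∧ |x| = x) ∨ (x < 0 ∧ |x| = -x) ∨ (x = 0 ∧ |x| = 0) := by
      rcases lt_trichotomy x 0 with h | h | h
      · exact Or.inr (Or.inl ⟨h, abs_of_neg h⟩)
      · exact Or.inr (Or.inr ⟨h, by rw [h]; simp⟩)
      · exact Or.inl ⟨h, abs_of_pos h⟩
    have ht1 : -V ≤ t := by
      rw [ht]
      rcases habs with ⟨h0, hA⟩ | ⟨h0, hA⟩ | ⟨h0, hA⟩
      · rw [hA, if_pos (by omega : x > 0)]
        omega
      · rw [hA, if_neg (by omega : ¬ x > 0)]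
        omega
      · rw [hA, if_neg (by omega : ¬ x > 0)]
        omega
    have ht2 : t < V := by
      rw [ht]
      rcases habs with ⟨h0, hA⟩ | ⟨h0, hA⟩ | ⟨h0, hA⟩
      · have := hxp h0
        rw [hA, if_pos (by omega : x > 0)]
        omega
      · have := hxn h0
        rw [hA, if_neg (by omega : ¬ x > 0)]
        omega
      · rw [hA, if_neg (by omega : ¬ x > 0)]
        omega
    have hnt1 : 0 ≤ normI V t := by unfold normI; split <;> omega
    have hnt2 : normI V t < V := by unfold normI; split <;> omega
    rw [hcl, hx, ← ht, htgt]
    have hfin : ∀ (r : List Int), ((r.length : Int) = V) →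
        PySem.List.pyGetD r b 0 = (if a < b ∧ b < base + 3*i + 3 then 1 else 0) →
        PySem.List.pyGetD (PySem.List.pySetD r t 1) b 0
          = if decide ((a < b ∧ b < base + 3 * i + 3) ∨ b = normI V t) = true then 1 else 0 := by
      intro r hrlen hrval
      rw [pyGetD_pySetD_norm _ _ _ hrlen ht1 ht2 hb.1 hb.2]
      by_cases h1 : b = normI V t
      · rw [if_pos h1, if_pos (by simp only [decide_eq_true_eq]; right; exact h1)]
      · rw [if_neg h1, hrval]
        by_cases h2 : a < b ∧ b < base + 3*i + 3
        · rw [if_pos h2, if_pos (by simp only [decide_eq_true_eq]; left; exact h2)]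
        · rw [if_neg h2, if_neg (by simp only [decide_eq_true_eq]; rintro (h | h); exact h2 h; exact h1 h)]
    rw [show (3:Int) * i = 3 * i from rfl]
    have hgoal : ∀ r, r = (PySem.List.pyRange (j + 1) 3 1).foldl
        (fun r k => PySem.List.pySetD r (base + 3 * i + k) 1) (List.replicate V.toNat (0:Int)) →
        ((r.length : Int) = V ∧
         PySem.List.pyGetD r b 0 = (if a < b ∧ b < base + 3*i + 3 then 1 else 0)) := by
      intro r hr
      rcases (by omega : j = 0 ∨ j = 1 ∨ j = 2) with hj0 | hj0 | hj0
      · rw [hj0, (by decide : PySem.List.pyRange (0+1) 3 1 = [1, 2])] at hr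
        simp only [List.foldl_cons, List.foldl_nil] at hr
        subst hr
        constructor
        · rw [PySem.List.length_pySetD, PySem.List.length_pySetD]; exact hzlen
        rw [pyGetD_pySetD_norm _ _ _ (by rw [PySem.List.length_pySetD]; exact hzlen)
            (by omega) (by omega) hb.1 hb.2]
        rw [pyGetD_pySetD_norm _ _ _ hzlen (by omega) (by omega) hb.1 hb.2]
        rw [show normI V (base + 3*i + 2) = base + 3*i + 2 from by unfold normI; rw [if_neg (by omega)]]
        rw [show normI V (base + 3*i + 1) = base + 3*i + 1 from by unfold normI; rw [if_neg (by omega)]]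
        rw [zcell hb.1 hb.2]
        split_ifs <;> omega
      · rw [hj0, (by decide : PySem.List.pyRange (1+1) 3 1 = [2])] at hr
        simp only [List.foldl_cons, List.foldl_nil] at hr
        subst hr
        constructor
        · rw [PySem.List.length_pySetD]; exact hzlen
        rw [pyGetD_pySetD_norm _ _ _ hzlen (by omega) (by omega) hb.1 hb.2]
        rw [show normI V (base + 3*i + 2) = base + 3*i + 2 from by unfold normI; rw [if_neg (by omega)]]
        rw [zcell hb.1 hb.2]
        split_ifs <;> omega
      · rw [hj0, (by decide : PySem.List.pyRange (2+1) 3 1 = [])] at hr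
        simp only [List.foldl_nil] at hr
        subst hr
        refine ⟨hzlen, ?_⟩
        rw [zcell hb.1 hb.2]
        split_ifs <;> omega
    obtain ⟨hrl, hrv⟩ := hgoal _ rfl
    exact hfin _ hrl hrv

lemma normI_of_nonneg {V t : Int} (h : 0 ≤ t) : normI V t = t := by
  unfold normI; rw [if_neg (by omega)]

lemma divmod3 {d k u : Int} (h : d = 3*k + u) (hu : 0 ≤ u ∧ u < 3) :
    PySem.Int.floordiv d 3 = k ∧ PySem.Int.mod d 3 = u := by
  have hf : PySem.Int.floordiv d 3 = k :=
    (PySem.Int.floordiv_eq_iff_of_pos (by norm_num)).mpr ⟨by omega, by omega⟩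
  have hm := PySem.Int.floordiv_mul_add_mod d 3
  rw [hf] at hm
  exact ⟨hf, by omega⟩

lemma litEdge_snd (p : Int) (c : List Int) (j : Int) :
    (litEdge p c j).2
      = (|PySem.List.pyGetD c j 0| - 1) * 2 + (if PySem.List.pyGetD c j 0 > 0 then 0 else 1) := by
  unfold litEdge
  show (if PySem.List.pyGetD c j 0 > 0 then (|PySem.List.pyGetD c j 0| - 1) * 2
        else (|PySem.List.pyGetD c j 0| - 1) * 2 + 1) = _
  by_cases h0 : PySem.List.pyGetD c j 0 > 0
  · rw [if_pos h0, if_pos h0]; try ring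
  · rw [if_neg h0, if_neg h0]; try ring

lemma litEdge_fst (p : Int) (c : List Int) (j : Int) : (litEdge p c j).1 = p + j := rfl

lemma mem_allEdges (clause : List (List Int)) (nv : List Int) (e : Int × Int) :
    e ∈ allEdges clause nv ↔
      (∃ n : Int, 0 ≤ n ∧ n < (nv.length : Int) ∧ e = (2*n, 2*n+1)) ∨
      (∃ (k : Nat) (_ : k < clause.length),
        (e = ((nv.length:Int)*2 + 3*k, (nv.length:Int)*2 + 3*k + 1) ∨
         e = ((nv.length:Int)*2 + 3*k, (nv.length:Int)*2 + 3*k + 2) ∨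
         e = ((nv.length:Int)*2 + 3*k + 1, (nv.length:Int)*2 + 3*k + 2) ∨
         ∃ j : Int, 0 ≤ j ∧ j < 3 ∧ e = litEdge ((nv.length:Int)*2 + 3*k) (clause[k]!) j)) := by
  unfold allEdges clauseEdges
  simp only [List.mem_append, List.mem_map, PySem.List.mem_pyRange_one, List.mem_flatMap,
    PySem.List.mem_enumerate_iff, List.mem_cons, List.not_mem_nil, or_false]
  constructor
  · rintro (⟨n, ⟨hn1, hn2⟩, hne⟩ | ⟨ic, ⟨k, hk, rfl⟩, hmem⟩)
    · exact Or.inl ⟨n, hn1, hn2, hne.symm⟩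
    · refine Or.inr ⟨k, hk, ?_⟩
      rw [List.getElem!_eq_getElem?_getD, List.getElem?_eq_getElem hk, Option.getD_some]
      simp only [zero_add] at hmem
      rcases hmem with (h | h | h) | ⟨j, ⟨hj1, hj2⟩, hje⟩
      · exact Or.inl (by rw [h])
      · exact Or.inr (Or.inl (by rw [h]))
      · exact Or.inr (Or.inr (Or.inl (by rw [h])))
      · refine Or.inr (Or.inr (Or.inr ⟨j, hj1, hj2, ?_⟩))
        rw [← hje]
  · rintro (⟨n, hn1, hn2, rfl⟩ | ⟨k, hk, hcase⟩)
    · exact Or.inl ⟨n, ⟨hn1, hn2⟩, rfl⟩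
    · rw [List.getElem!_eq_getElem?_getD, List.getElem?_eq_getElem hk, Option.getD_some] at hcase
      refine Or.inr ⟨((k : Int), clause[k]), ⟨k, hk, by rw [zero_add]⟩, ?_⟩
      rcases hcase with h | h | h | ⟨j, hj1, hj2, h⟩
      · exact Or.inl (Or.inl (by rw [h]))
      · exact Or.inl (Or.inr (Or.inl (by rw [h])))
      · exact Or.inl (Or.inr (Or.inr (by rw [h])))
      · refine Or.inr ⟨j, ⟨hj1, hj2⟩, ?_⟩
        rw [h]

lemma getBang_eq (clause : List (List Int)) {k : Nat} (hk : k < clause.length) :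
    clause[k]! = clause[k]'hk := by
  rw [List.getElem!_eq_getElem?_getD, List.getElem?_eq_getElem hk, Option.getD_some]

lemma pyGetD_natCast_getElem (clause : List (List Int)) {k : Nat} (hk : k < clause.length) :
    PySem.List.pyGetD clause (k : Int) [] = clause[k]'hk := by
  rw [PySem.List.pyGetD_eq_getElem clause [] (by omega) (by omega)]
  simp

lemma tgtOf_eq_lit (clause : List (List Int)) (nv : List Int) {a : Int} {k : Nat} {j : Int}
    (hk : k < clause.length) (hj : 0 ≤ j ∧ j < 3)
    (haeq : a = (nv.length : Int)*2 + 3*k + j) :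
    tgtOf clause ((nv.length : Int)*2) a
      = (litEdge ((nv.length : Int)*2 + 3*k) (clause[k]!) j).2 := by
  obtain ⟨hf, hm⟩ := divmod3 (show a - (nv.length : Int)*2 = 3*k + j by omega) hj
  unfold tgtOf
  rw [hf, hm, pyGetD_natCast_getElem clause hk, litEdge_snd, getBang_eq clause hk]

lemma xbounds (clause : List (List Int)) (nv : List Int) (hpre : Pre_vertexCover3 clause nv)
    {k : Nat} {j : Int} (hk : k < clause.length) (hj : 0 ≤ j ∧ j < 3) :
    -((nv.length : Int)*2 + (clause.length : Int)*3)
        ≤ (litEdge ((nv.length : Int)*2 + 3*k) (clause[k]!) j).2 ∧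
      (litEdge ((nv.length : Int)*2 + 3*k) (clause[k]!) j).2
        < (nv.length : Int)*2 + (clause.length : Int)*3 := by
  obtain ⟨hclen, hxcond⟩ := hpre _ (List.getElem_mem hk)
  have hjlt : j.toNat < (clause[k]'hk).length := by omega
  have hx : PySem.List.pyGetD (clause[k]'hk) j 0 = (clause[k]'hk)[j.toNat]'hjlt :=
    PySem.List.pyGetD_eq_getElem _ 0 hj.1 (by omega)
  have hxmem : (clause[k]'hk)[j.toNat]'hjlt ∈ (clause[k]'hk).take 3 := by
    rw [List.mem_take_iff_getElem]
    exact ⟨j.toNat, by omega, rfl⟩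
  obtain ⟨hxp, hxn⟩ := hxcond _ hxmem
  rw [litEdge_snd, getBang_eq clause hk, hx]
  set x : Int := (clause[k]'hk)[j.toNat]'hjlt with hxv
  have habs : (0 < x ∧ |x| = x) ∨ (x < 0 ∧ |x| = -x) ∨ (x = 0 ∧ |x| = 0) := by
    rcases lt_trichotomy x 0 with h | h | h
    · exact Or.inr (Or.inl ⟨h, abs_of_neg h⟩)
    · exact Or.inr (Or.inr ⟨h, by rw [h]; simp⟩)
    · exact Or.inl ⟨h, abs_of_pos h⟩
  rcases habs with ⟨h0, hA⟩ | ⟨h0, hA⟩ | ⟨h0, hA⟩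
  · have := hxp h0
    rw [hA, if_pos (by omega : x > 0)]
    constructor <;> omega
  · have := hxn h0
    rw [hA, if_neg (by omega : ¬ x > 0)]
    constructor <;> omega
  · rw [hA, if_neg (by omega : ¬ x > 0)]
    constructor <;> omega

lemma allEdges_bounds (clause : List (List Int)) (nv : List Int)
    (hpre : Pre_vertexCover3 clause nv) :
    ∀ e ∈ allEdges clause nv,
      -((nv.length : Int)*2 + (clause.length : Int)*3) ≤ e.1 ∧
      e.1 < (nv.length : Int)*2 + (clause.length : Int)*3 ∧
      -((nv.length : Int)*2 + (clause.length : Int)*3) ≤ e.2 ∧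
      e.2 < (nv.length : Int)*2 + (clause.length : Int)*3 := by
  intro e he
  rw [mem_allEdges] at he
  rcases he with ⟨n, hn1, hn2, rfl⟩ | ⟨k, hk, he⟩
  · refine ⟨by simp; omega, by simp; omega, by simp; omega, by simp; omega⟩
  · rcases he with rfl | rfl | rfl | ⟨j, hj1, hj2, rfl⟩
    · refine ⟨by simp; omega, by simp; omega, by simp; omega, by simp; omega⟩
    · refine ⟨by simp; omega, by simp; omega, by simp; omega, by simp; omega⟩
    · refine ⟨by simp; omega, by simp; omega, by simp; omega, by simp; omega⟩
    · have h2 := xbounds clause nv hpre hk ⟨hj1, hj2⟩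
      rw [litEdge_fst]
      exact ⟨by omega, by omega, h2.1, h2.2⟩

lemma dir_fwd (clause : List (List Int)) (nv : List Int) (hpre : Pre_vertexCover3 clause nv)
    {a b : Int}
    (ha : 0 ≤ a ∧ a < (nv.length : Int)*2 + (clause.length : Int)*3)
    (hb : 0 ≤ b ∧ b < (nv.length : Int)*2 + (clause.length : Int)*3) :
    (∃ e ∈ allEdges clause nv,
        a = normI ((nv.length : Int)*2 + (clause.length : Int)*3) e.1 ∧
        b = normI ((nv.length : Int)*2 + (clause.length : Int)*3) e.2) ↔
      fwdB clause ((nv.length : Int)*2) ((nv.length : Int)*2 + (clause.length : Int)*3) a b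
        = true := by
  constructor
  · rintro ⟨e, hme, hea, heb⟩
    rw [mem_allEdges] at hme
    rcases hme with ⟨n, hn1, hn2, rfl⟩ | ⟨k, hk, he⟩
    · simp only [normI_of_nonneg (by omega : (0:Int) ≤ 2*n)] at hea
      simp only [normI_of_nonneg (by omega : (0:Int) ≤ 2*n+1)] at heb
      unfold fwdB
      rw [if_pos (by omega : a < (nv.length : Int)*2)]
      simp only [decide_eq_true_eq]
      exact ⟨(PySem.Int.mod_eq_zero_iff_dvd a 2).mpr ⟨n, by omega⟩, by omega⟩
    · rcases he with rfl | rfl | rfl | ⟨j, hj1, hj2, rfl⟩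
      · simp only [normI_of_nonneg (by omega : (0:Int) ≤ (nv.length : Int)*2 + 3*(k:Int))] at hea
        simp only [normI_of_nonneg (by omega : (0:Int) ≤ (nv.length : Int)*2 + 3*(k:Int) + 1)] at heb
        obtain ⟨hf, hm⟩ := divmod3 (show a - (nv.length : Int)*2 = 3*(k:Int) + 0 by omega) (by omega)
        unfold fwdB
        rw [if_neg (by omega : ¬ a < (nv.length : Int)*2), hf]
        simp only [decide_eq_true_eq]
        exact Or.inl ⟨by omega, by omega⟩
      · simp only [normI_of_nonneg (by omega : (0:Int) ≤ (nv.length : Int)*2 + 3*(k:Int))] at hea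
        simp only [normI_of_nonneg (by omega : (0:Int) ≤ (nv.length : Int)*2 + 3*(k:Int) + 2)] at heb
        obtain ⟨hf, hm⟩ := divmod3 (show a - (nv.length : Int)*2 = 3*(k:Int) + 0 by omega) (by omega)
        unfold fwdB
        rw [if_neg (by omega : ¬ a < (nv.length : Int)*2), hf]
        simp only [decide_eq_true_eq]
        exact Or.inl ⟨by omega, by omega⟩
      · simp only [normI_of_nonneg (by omega : (0:Int) ≤ (nv.length : Int)*2 + 3*(k:Int) + 1)] at hea
        simp only [normI_of_nonneg (by omega : (0:Int) ≤ (nv.length : Int)*2 + 3*(k:Int) + 2)] at heb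
        obtain ⟨hf, hm⟩ := divmod3 (show a - (nv.length : Int)*2 = 3*(k:Int) + 1 by omega) (by omega)
        unfold fwdB
        rw [if_neg (by omega : ¬ a < (nv.length : Int)*2), hf]
        simp only [decide_eq_true_eq]
        exact Or.inl ⟨by omega, by omega⟩
      · rw [litEdge_fst] at hea
        simp only [normI_of_nonneg (by omega : (0:Int) ≤ (nv.length : Int)*2 + 3*(k:Int) + j)] at hea
        have htg := tgtOf_eq_lit clause nv hk ⟨hj1, hj2⟩ (by omega : a = (nv.length : Int)*2 + 3*(k:Int) + j)
        obtain ⟨hf, hm⟩ := divmod3 (show a - (nv.length : Int)*2 = 3*(k:Int) + j by omega) ⟨hj1, hj2⟩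
        unfold fwdB
        rw [if_neg (by omega : ¬ a < (nv.length : Int)*2)]
        simp only [decide_eq_true_eq]
        right
        rw [htg]
        exact heb
  · intro hf
    unfold fwdB at hf
    by_cases hav : a < (nv.length : Int)*2
    · rw [if_pos hav] at hf
      simp only [decide_eq_true_eq] at hf
      obtain ⟨hmod, hb1⟩ := hf
      obtain ⟨n, hn⟩ := (PySem.Int.mod_eq_zero_iff_dvd a 2).mp hmod
      refine ⟨(2*n, 2*n+1), (mem_allEdges clause nv _).mpr (Or.inl ⟨n, by omega, by omega, rfl⟩), ?_, ?_⟩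
      · rw [normI_of_nonneg (by omega : (0:Int) ≤ 2*n)]; omega
      · rw [normI_of_nonneg (by omega : (0:Int) ≤ 2*n+1)]; omega
    · rw [if_neg hav] at hf
      simp only [decide_eq_true_eq] at hf
      set i : Int := PySem.Int.floordiv (a - (nv.length : Int)*2) 3 with hi
      set j : Int := PySem.Int.mod (a - (nv.length : Int)*2) 3 with hj
      have hj1 : 0 ≤ j := PySem.Int.mod_nonneg _ (by norm_num)
      have hj2 : j < 3 := PySem.Int.mod_lt _ (by norm_num)
      have hij : i * 3 + j = a - (nv.length : Int)*2 := PySem.Int.floordiv_mul_add_mod _ _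
      have hi1 : 0 ≤ i := by omega
      have hilt : i.toNat < clause.length := by omega
      have hik : ((i.toNat : Int)) = i := by omega
      rcases hf with ⟨hab, hlt⟩ | hlit
      · -- triangle edge
        rcases (by omega : (j = 0 ∧ b = (nv.length : Int)*2 + 3*i + 1) ∨ (j = 0 ∧ b = (nv.length : Int)*2 + 3*i + 2) ∨
            (j = 1 ∧ b = (nv.length : Int)*2 + 3*i + 2)) with ⟨hj0, hbv⟩ | ⟨hj0, hbv⟩ | ⟨hj0, hbv⟩
        · refine ⟨((nv.length : Int)*2 + 3*(i.toNat : Int), (nv.length : Int)*2 + 3*(i.toNat : Int) + 1),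
            (mem_allEdges clause nv _).mpr (Or.inr ⟨i.toNat, hilt, Or.inl rfl⟩), ?_, ?_⟩
          · rw [normI_of_nonneg (by omega)]; omega
          · rw [normI_of_nonneg (by omega)]; omega
        · refine ⟨((nv.length : Int)*2 + 3*(i.toNat : Int), (nv.length : Int)*2 + 3*(i.toNat : Int) + 2),
            (mem_allEdges clause nv _).mpr (Or.inr ⟨i.toNat, hilt, Or.inr (Or.inl rfl)⟩), ?_, ?_⟩
          · rw [normI_of_nonneg (by omega)]; omega
          · rw [normI_of_nonneg (by omega)]; omega
        · refine ⟨((nv.length : Int)*2 + 3*(i.toNat : Int) + 1, (nv.length : Int)*2 + 3*(i.toNat : Int) + 2),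
            (mem_allEdges clause nv _).mpr (Or.inr ⟨i.toNat, hilt, Or.inr (Or.inr (Or.inl rfl))⟩), ?_, ?_⟩
          · rw [normI_of_nonneg (by omega)]; omega
          · rw [normI_of_nonneg (by omega)]; omega
      · -- literal edge
        have htg := tgtOf_eq_lit clause nv hilt ⟨hj1, hj2⟩ (by omega : a = (nv.length : Int)*2 + 3*(i.toNat : Int) + j)
        refine ⟨litEdge ((nv.length : Int)*2 + 3*(i.toNat : Int)) (clause[i.toNat]!) j,
          (mem_allEdges clause nv _).mpr (Or.inr ⟨i.toNat, hilt,
            Or.inr (Or.inr (Or.inr ⟨j, hj1, hj2, rfl⟩))⟩), ?_, ?_⟩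
        · rw [litEdge_fst, normI_of_nonneg (by omega)]; omega
        · rw [← htg]; exact hlit

lemma any_eq (clause : List (List Int)) (nv : List Int) (hpre : Pre_vertexCover3 clause nv)
    {a b : Int}
    (ha : 0 ≤ a ∧ a < (nv.length : Int)*2 + (clause.length : Int)*3)
    (hb : 0 ≤ b ∧ b < (nv.length : Int)*2 + (clause.length : Int)*3) :
    (allEdges clause nv).any (eMatch ((nv.length : Int)*2 + (clause.length : Int)*3) a b)
      = (fwdB clause ((nv.length : Int)*2) ((nv.length : Int)*2 + (clause.length : Int)*3) a b
         || fwdB clause ((nv.length : Int)*2) ((nv.length : Int)*2 + (clause.length : Int)*3) b a) := by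
  have h1 := dir_fwd clause nv hpre ha hb
  have h2 := dir_fwd clause nv hpre hb ha
  rw [Bool.eq_iff_iff, List.any_eq_true]
  simp only [eMatch, decide_eq_true_eq, Bool.or_eq_true]
  constructor
  · rintro ⟨e, hme, hm | hm⟩
    · exact Or.inl (h1.mp ⟨e, hme, hm.1, hm.2⟩)
    · exact Or.inr (h2.mp ⟨e, hme, hm.2, hm.1⟩)
  · rintro (h | h)
    · obtain ⟨e, hme, hm⟩ := h1.mpr h
      exact ⟨e, hme, Or.inl hm⟩
    · obtain ⟨e, hme, hm⟩ := h2.mpr h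
      exact ⟨e, hme, Or.inr ⟨hm.2, hm.1⟩⟩

def Mspec (clause : List (List Int)) (nv : List Int) : List (List Int) :=
  (PySem.List.pyRange 0 ((nv.length:Int)*2 + (clause.length:Int)*3) 1).map (fun a =>
    (PySem.List.pyRange 0 ((nv.length:Int)*2 + (clause.length:Int)*3) 1).map (fun b =>
      if fwdB clause ((nv.length:Int)*2) ((nv.length:Int)*2 + (clause.length:Int)*3) a b
         || fwdB clause ((nv.length:Int)*2) ((nv.length:Int)*2 + (clause.length:Int)*3) b a
      then (1:Int) else 0))

lemma max_ite01 (p q : Bool) :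
    max (if p then (1:Int) else 0) (if q then (1:Int) else 0) = if p || q then (1:Int) else 0 := by
  cases p <;> cases q <;> simp

lemma B_eq (clause : List (List Int)) (nv : List Int) (hpre : Pre_vertexCover3 clause nv) :
    vertexCover3_alt clause nv
      = ((nv.length:Int)*2 + (clause.length:Int)*3,
         (nv.length:Int) + (clause.length:Int)*2, Mspec clause nv) := by
  have hV0 : (0:Int) ≤ (nv.length:Int)*2 + (clause.length:Int)*3 := by omega
  unfold vertexCover3_alt Mspec
  simp only []
  have hz : (PySem.List.pyRange 0 ((nv.length:Int)*2 + (clause.length:Int)*3) 1).map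
      (fun _ => List.replicate ((nv.length:Int)*2 + (clause.length:Int)*3).toNat (0:Int))
      = List.replicate ((nv.length:Int)*2 + (clause.length:Int)*3).toNat
          (List.replicate ((nv.length:Int)*2 + (clause.length:Int)*3).toNat (0:Int)) := by
    rw [List.map_const', PySem.List.length_pyRange_one]
    norm_num
  rw [hz]
  have hfold := fold_rows (rowUpdate clause ((nv.length:Int)*2))
    (List.replicate ((nv.length:Int)*2 + (clause.length:Int)*3).toNat 0)
    ((nv.length:Int)*2 + (clause.length:Int)*3)
    ((nv.length:Int)*2 + (clause.length:Int)*3).toNat [] (by simp; omega)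
  simp only [List.nil_append, List.length_nil, Nat.cast_zero] at hfold
  rw [hfold]
  refine congrArg (Prod.mk _) (congrArg (Prod.mk _) ?_)
  apply List.map_congr_left
  intro a hmem
  rw [PySem.List.mem_pyRange_one] at hmem
  apply List.map_congr_left
  intro b hbmem
  rw [PySem.List.mem_pyRange_one] at hbmem
  rw [PySem.List.pyGetD_map_pyRange_of_nonneg _ _ _ _ hmem.1 hmem.2]
  rw [PySem.List.pyGetD_map_pyRange_of_nonneg _ _ _ _ hbmem.1 hbmem.2]
  rw [rowCell clause nv hpre ⟨hmem.1, hmem.2⟩ ⟨hbmem.1, hbmem.2⟩]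
  rw [rowCell clause nv hpre ⟨hbmem.1, hbmem.2⟩ ⟨hmem.1, hmem.2⟩]
  exact max_ite01 _ _

lemma shp_zeroM (clause : List (List Int)) (nv : List Int) :
    Shp ((nv.length:Int)*2 + (clause.length:Int)*3)
      (zeroM ((nv.length:Int)*2 + (clause.length:Int)*3)) := by
  constructor
  · simp [zeroM, PySem.List.length_pyRange_one]
    omega
  · intro r hr
    simp only [zeroM, List.mem_map] at hr
    obtain ⟨_, _, rfl⟩ := hr
    simp
    omega

lemma AM_eq (clause : List (List Int)) (nv : List Int) (hpre : Pre_vertexCover3 clause nv) :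
    (allEdges clause nv).foldl fillEdge
        (zeroM ((nv.length:Int)*2 + (clause.length:Int)*3))
      = Mspec clause nv := by
  have hV0 : (0:Int) ≤ (nv.length:Int)*2 + (clause.length:Int)*3 := by omega
  obtain ⟨hshp, hcell⟩ := cell_foldFill (allEdges clause nv)
    (zeroM ((nv.length:Int)*2 + (clause.length:Int)*3)) (shp_zeroM clause nv)
    (allEdges_bounds clause nv hpre)
  have hlenM : (Mspec clause nv).length = ((nv.length:Int)*2 + (clause.length:Int)*3).toNat := by
    simp [Mspec, PySem.List.length_pyRange_one]
  have hlenF : (List.foldl fillEdge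
      (zeroM ((nv.length:Int)*2 + (clause.length:Int)*3)) (allEdges clause nv)).length
      = ((nv.length:Int)*2 + (clause.length:Int)*3).toNat := by
    have := hshp.1
    omega
  apply List.ext_getElem (by rw [hlenF, hlenM])
  intro n h1 h2
  have hnV : (n : Int) < (nv.length:Int)*2 + (clause.length:Int)*3 := by
    rw [hlenF] at h1
    omega
  have hrowlen : ((List.foldl fillEdge
      (zeroM ((nv.length:Int)*2 + (clause.length:Int)*3)) (allEdges clause nv))[n]).length
      = ((nv.length:Int)*2 + (clause.length:Int)*3).toNat := by
    have := hshp.2 _ (List.getElem_mem h1)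
    omega
  have hrowM : (Mspec clause nv)[n]'h2
      = (PySem.List.pyRange 0 ((nv.length:Int)*2 + (clause.length:Int)*3) 1).map (fun b =>
          if fwdB clause ((nv.length:Int)*2) ((nv.length:Int)*2 + (clause.length:Int)*3) (0+(n:Int)) b
             || fwdB clause ((nv.length:Int)*2) ((nv.length:Int)*2 + (clause.length:Int)*3) b (0+(n:Int))
          then (1:Int) else 0) := by
    simp only [Mspec, List.getElem_map, PySem.List.getElem_pyRange_one]
  apply List.ext_getElem
  · rw [hrowlen, hrowM]
    simp [PySem.List.length_pyRange_one]
  intro k hk1 hk2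
  have hkV : (k : Int) < (nv.length:Int)*2 + (clause.length:Int)*3 := by
    rw [hrowlen] at hk1
    omega
  have hLHS : cellM (List.foldl fillEdge
          (zeroM ((nv.length:Int)*2 + (clause.length:Int)*3)) (allEdges clause nv)) (n:Int) (k:Int)
      = (List.foldl fillEdge
          (zeroM ((nv.length:Int)*2 + (clause.length:Int)*3)) (allEdges clause nv))[n][k] := by
    unfold cellM
    simp only [PySem.List.pyGetD_natCast]
    rw [List.getD_eq_getElem _ _ h1, List.getD_eq_getElem _ _ (by omega)]
  have hzc : cellM (zeroM ((nv.length:Int)*2 + (clause.length:Int)*3)) (n:Int) (k:Int) = 0 := by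
    unfold cellM zeroM
    rw [PySem.List.pyGetD_map_pyRange_of_nonneg _ _ _ _ (by omega) hnV]
    exact zcell (by omega) hkV
  rw [← hLHS, hcell (n:Int) (k:Int) ⟨by omega, hnV⟩ ⟨by omega, hkV⟩, hzc]
  rw [any_eq clause nv hpre ⟨by omega, hnV⟩ ⟨by omega, hkV⟩]
  have hR : ((Mspec clause nv)[n]'h2)[k]'hk2
      = (if (fwdB clause ((nv.length:Int)*2) ((nv.length:Int)*2 + (clause.length:Int)*3) (n:Int) (k:Int)
             || fwdB clause ((nv.length:Int)*2) ((nv.length:Int)*2 + (clause.length:Int)*3) (k:Int) (n:Int))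
         then (1:Int) else 0) := by
    simp only [Mspec, List.getElem_map, PySem.List.getElem_pyRange_one, zero_add]
  rw [hR]

-- ===== VERDICT (by name: the statement is the Claim_ definition above) =====
theorem vertexCover3_spec : Claim_equal_vertexCover3 := by
  intro clause nv _ hpre
  show vertexCover3 clause nv = vertexCover3_alt clause nv
  rw [A_eq clause nv, AM_eq clause nv hpre, B_eq clause nv hpre]
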